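-- pv_equiv track=rewrite | github.com/nnMan1/vizener-decrypt | algorithm/vizener.py | characters_count
-- ===== SOURCE A (Python) =====
-- def characters_count(text, key_length, offset): #broji slova u kriptogramu text na  pozicijama offset,offset+key_lenght ,....
--     ret_val = [0] * 26  # ret_val je niz od 26 brojeva koji govore koliko se puta i-to slovo pojavilo u podnizu
--     text_length = len(text)
--     br = 0
--
--     for c in range(offset, text_length, key_length):
--         if(ord(text[c]) >= ord('a') and ord(text[c]) <= ord('z')):
--             ret_val[ord(text[c])- ord('a')] = ret_val[ord(text[c])- ord('a')] + 1
--             br = br+1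
--
--     return ret_val, br
-- ===== SOURCE B (Python) =====
-- def characters_count(text, key_length, offset):
--     sub = [text[c] for c in range(offset, len(text), key_length)]
--     ret_val = [sub.count(chr(ord('a') + i)) for i in range(26)]
--     return ret_val, sum(ret_val)
-- ===== Notes on version B (the rewrite author's own statement) =====
-- stated objective: idiomatic
-- what changed: B extracts the strided substring once and then counts each of the 26 lowercase letters with a separate list.count scan, summing the counts for br, instead of A's single pass that branches on each character and updates a mutable 26-slot table and a running counter.
import Mathlib
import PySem

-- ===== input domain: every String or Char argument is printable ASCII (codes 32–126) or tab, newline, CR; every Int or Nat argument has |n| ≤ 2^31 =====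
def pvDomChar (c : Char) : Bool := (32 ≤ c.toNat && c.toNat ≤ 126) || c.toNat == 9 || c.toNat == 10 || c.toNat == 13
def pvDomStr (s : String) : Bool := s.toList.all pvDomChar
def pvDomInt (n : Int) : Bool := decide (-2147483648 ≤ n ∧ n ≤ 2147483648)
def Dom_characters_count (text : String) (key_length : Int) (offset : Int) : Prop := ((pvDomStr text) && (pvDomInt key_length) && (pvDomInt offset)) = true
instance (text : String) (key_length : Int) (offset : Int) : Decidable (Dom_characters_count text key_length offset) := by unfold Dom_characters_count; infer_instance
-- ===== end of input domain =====

-- B replaces A's single branching pass (mutable 26-slot table + running counter) by building the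
-- strided substring once, counting each of the 26 lowercase letters with a separate scan, and
-- summing those counts; same return value wherever A returns normally (Pre_).

-- ===== PORT A =====
-- loop body of A: on each visited character, bump its slot and the counter if it is 'a'..'z'
-- (the Python index ord(text[c])-ord('a') is a Nat in 0..25 inside the branch, so .set/.getD are exact)
def pvStepA (st : List Int × Int) (ch : Char) : List Int × Int :=
  if 97 ≤ ch.toNat ∧ ch.toNat ≤ 122 then
    (st.1.set (ch.toNat - 97) (st.1.getD (ch.toNat - 97) 0 + 1), st.2 + 1)
  else st

def characters_count (text : String) (key_length : Int) (offset : Int) : List Int × Int :=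
  -- text[c] via pyGet?; the default ' ' is never used under Pre_ (all indices in range)
  (PySem.List.pyRange offset (PySem.Str.len text) key_length).foldl
    (fun st c => pvStepA st ((PySem.Str.pyGet? text c).getD ' '))
    (List.replicate 26 0, 0)

-- ===== PORT B =====
-- sub = [text[c] for c in range(offset, len(text), key_length)], then 26 per-letter count scans
def characters_count_alt (text : String) (key_length : Int) (offset : Int) : List Int × Int :=
  let ret_val := (PySem.List.pyRange 0 26).map
    (fun i => (PySem.List.count
      ((PySem.List.pyRange offset (PySem.Str.len text) key_length).map
        (fun c => (PySem.Str.pyGet? text c).getD ' '))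
      (Char.ofNat (97 + i.toNat)) : Int))
  (ret_val, ret_val.sum)

-- ===== PRECONDITION & SPEC =====
-- exactly the inputs on which the Python A returns normally: key_length = 0 raises ValueError, and
-- an offset making the first visited index fall outside [-len, len) raises IndexError
def Pre_characters_count (text : String) (key_length : Int) (offset : Int) : Prop :=
  (0 < key_length ∧ -(text.toList.length : Int) ≤ offset) ∨
  (key_length < 0 ∧ offset ≤ (text.toList.length : Int))
instance (text : String) (key_length : Int) (offset : Int) : Decidable (Pre_characters_count text key_length offset) := by unfold Pre_characters_count; infer_instance

def pvWitness_characters_count : String × Int × Int := ("abcabz", 2, 1)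

def Spec_characters_count (text : String) (key_length : Int) (offset : Int) (out : List Int × Int) : Prop := out = characters_count_alt text key_length offset
instance (text : String) (key_length : Int) (offset : Int) (out : List Int × Int) : Decidable (Spec_characters_count text key_length offset out) := by unfold Spec_characters_count; infer_instance

-- ===== CLAIM (what is proved, stated in full; the proofs are below) =====
def Claim_equal_characters_count : Prop := ∀ (text : String) (key_length : Int) (offset : Int), Dom_characters_count text key_length offset → Pre_characters_count text key_length offset → Spec_characters_count text key_length offset (characters_count text key_length offset)

-- ===== LEMMAS AND PROOFS =====

theorem pv_toNat_ofNat (n : Nat) (h : n < 1000) : (Char.ofNat n).toNat = n := by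
  have hv : n.isValidChar := Or.inl (by omega)
  simp [Char.ofNat, hv, Char.ofNatAux]

theorem pv_char_eq {a b : Char} (h : a.toNat = b.toNat) : a = b :=
  Char.ext (UInt32.toNat_inj.mp h)

theorem pv_getD_set (r : List Int) (j : Nat) (v : Int) (i : Nat) (hj : j < r.length) :
    (r.set j v).getD i 0 = if i = j then v else r.getD i 0 := by
  simp only [List.getD_eq_getElem?_getD, List.getElem?_set]
  rcases eq_or_ne j i with rfl | h
  · simp [hj]
  · simp [h, Ne.symm h]

-- A's fold, from an arbitrary 26-slot table, computes per-letter counts plus a lowercase total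
theorem pv_foldA (cs : List Char) (r : List Int) (b : Int) (hr : r.length = 26) :
    cs.foldl pvStepA (r, b) =
      ((List.range 26).map (fun i => r.getD i 0 + (cs.count (Char.ofNat (97 + i)) : Int)),
       b + ((cs.countP (fun c => decide (97 ≤ c.toNat ∧ c.toNat ≤ 122)) : Nat) : Int)) := by
  induction cs generalizing r b with
  | nil =>
      simp only [List.foldl_nil, List.count_nil, List.countP_nil]
      refine congrArg₂ Prod.mk ?_ (by simp)
      apply List.ext_getElem (by simp [hr])
      intro i h1 h2
      have hi : i < r.length := h1
      simp only [List.getElem_map, List.getElem_range, List.getD_eq_getElem?_getD,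
        List.getElem?_eq_getElem hi]
      simp
  | cons ch cs ih =>
      simp only [List.foldl_cons]
      by_cases h : 97 ≤ ch.toNat ∧ ch.toNat ≤ 122
      · have hstep : pvStepA (r, b) ch =
            (r.set (ch.toNat - 97) (r.getD (ch.toNat - 97) 0 + 1), b + 1) := by
          simp [pvStepA, h]
        rw [hstep, ih _ _ (by simp [hr])]
        refine congrArg₂ Prod.mk ?_ ?_
        · apply List.map_congr_left
          intro i hi
          have hi26 : i < 26 := List.mem_range.mp hi
          have hcnt : (Char.ofNat (97 + i)).toNat = 97 + i := pv_toNat_ofNat _ (by omega)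
          rw [pv_getD_set r _ _ _ (by omega)]
          rw [List.count_cons]
          by_cases hij : i = ch.toNat - 97
          · have hch : ch = Char.ofNat (97 + i) := (pv_char_eq (by omega)).symm
            have hbeq : (ch == Char.ofNat (97 + i)) = true := beq_iff_eq.mpr hch
            rw [hij] at hbeq
            rw [if_pos hij, hij, hbeq]
            simp
            ring
          · have hch : ¬ (ch = Char.ofNat (97 + i)) := by
              intro hc
              have := congrArg Char.toNat hc
              omega
            simp [hij, beq_iff_eq, hch]
        · simp only [List.countP_cons, h]
          simp
          ring
      · have hstep : pvStepA (r, b) ch = (r, b) := by simp [pvStepA, h]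
        rw [hstep, ih _ _ hr]
        refine congrArg₂ Prod.mk ?_ ?_
        · apply List.map_congr_left
          intro i hi
          have hi26 : i < 26 := List.mem_range.mp hi
          have hcnt : (Char.ofNat (97 + i)).toNat = 97 + i := pv_toNat_ofNat _ (by omega)
          rw [List.count_cons]
          have hch : ¬ (ch = Char.ofNat (97 + i)) := by
            intro hc
            have := congrArg Char.toNat hc
            omega
          simp [beq_iff_eq, hch]
        · simp [h]

-- the 26 per-letter counts sum to the number of lowercase characters
theorem pv_sum_counts (cs : List Char) :
    ((List.range 26).map (fun i => (cs.count (Char.ofNat (97 + i)) : Int))).sum =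
      ((cs.countP (fun c => decide (97 ≤ c.toNat ∧ c.toNat ≤ 122)) : Nat) : Int) := by
  induction cs with
  | nil => simp
  | cons ch cs ih =>
      simp only [List.count_cons, List.countP_cons]
      push_cast
      rw [show (fun i => ((cs.count (Char.ofNat (97 + i)) : Int) +
            if (ch == Char.ofNat (97 + i)) = true then 1 else 0)) =
          (fun i => (cs.count (Char.ofNat (97 + i)) : Int) +
            (fun i => if (ch == Char.ofNat (97 + i)) = true then (1 : Int) else 0) i) from rfl]
      rw [PySem.List.sum_map_add_int, ih]
      congr 1
      rw [PySem.List.sum_map_ite_one_zero (fun i => ch == Char.ofNat (97 + i))]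
      by_cases h : 97 ≤ ch.toNat ∧ ch.toNat ≤ 122
      · have h1 : (List.range 26).countP (fun i => ch == Char.ofNat (97 + i)) =
            (List.range 26).countP (fun i => i == ch.toNat - 97) := by
          apply List.countP_congr
          intro i hi
          have hi26 : i < 26 := List.mem_range.mp hi
          have hcnt : (Char.ofNat (97 + i)).toNat = 97 + i := pv_toNat_ofNat _ (by omega)
          simp only [beq_iff_eq]
          constructor
          · intro hc; have := congrArg Char.toNat hc; omega
          · intro hc; exact (pv_char_eq (by omega)).symm
        have h2 : (List.range 26).countP (fun i => i == ch.toNat - 97) =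
            (List.range 26).count (ch.toNat - 97) := by
          simp [List.count]
        rw [h1, h2, List.count_range]
        simp [h]
        omega
      · have h1 : (List.range 26).countP (fun i => ch == Char.ofNat (97 + i)) = 0 := by
          rw [List.countP_eq_zero]
          intro i hi
          have hi26 : i < 26 := List.mem_range.mp hi
          have hcnt : (Char.ofNat (97 + i)).toNat = 97 + i := pv_toNat_ofNat _ (by omega)
          simp only [beq_iff_eq]
          intro hc; have := congrArg Char.toNat hc; omega
        rw [h1]
        simp [h]

-- B's 26-entry result list, rewritten over List.range
theorem pv_alt_ret (cs : List Char) :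
    (PySem.List.pyRange 0 26).map (fun i => (PySem.List.count cs (Char.ofNat (97 + i.toNat)) : Int)) =
      (List.range 26).map (fun i => (cs.count (Char.ofNat (97 + i)) : Int)) := by
  rw [show (26 : Int) = ((26 : Nat) : Int) from rfl, PySem.List.pyRange_zero_nat, List.map_map]
  apply List.map_congr_left
  intro i _
  simp [PySem.List.count_eq]

-- ===== VERDICT (by name: the statement is the Claim_ definition above) =====
theorem characters_count_spec : Claim_equal_characters_count := by
  intro text key_length offset _ _
  unfold Spec_characters_count characters_count characters_count_alt
  dsimp only
  rw [← List.foldl_map (f := fun c => (PySem.Str.pyGet? text c).getD ' ') (g := pvStepA)]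
  rw [pv_foldA _ _ _ (by simp)]
  rw [pv_alt_ret, pv_sum_counts]
  refine congrArg₂ Prod.mk ?_ (by ring)
  apply List.map_congr_left
  intro i hi
  have h26 : i < 26 := List.mem_range.mp hi
  rw [List.getD_eq_getElem?_getD,
    List.getElem?_eq_getElem (by simpa using h26 : i < (List.replicate 26 (0 : Int)).length),
    List.getElem_replicate]
  simp
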